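-- pv_equiv track=rewrite | github.com/andsanv/f1_season_simulator | calculator/main.py | get_ops_indexes
-- ===== SOURCE A (Python) =====
-- def get_indexes(list, c):       # returns a list of indexes
--     indexes = []
--
--     for i in range(len(list)):
--         if list[i] == c:
--             indexes.append(i)
--
--     return indexes
--
-- def get_ops_indexes(expression):  # returns a multidimensional list that contains the inedexes of the list that contain operators
--     ops_dict = {
--         'v': get_indexes(expression, 'v'), '^': get_indexes(expression, '^'),
--         '/': get_indexes(expression, '/'), '*': get_indexes(expression, '*'),
--         '+': get_indexes(expression, '+'), '-': get_indexes(expression, '-'),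
--     }
--
--     indexes = []
--     for item, val in ops_dict.items():
--         try:
--             expression.index(item)
--             indexes.append(val)
--         except ValueError:
--             indexes.append([])
--
--     return indexes
-- ===== SOURCE B (Python) =====
-- def get_ops_indexes(expression):
--     ops = {'v': [], '^': [], '/': [], '*': [], '+': [], '-': []}
--     for i, tok in enumerate(expression):
--         if tok in ops:
--             ops[tok].append(i)
--     return list(ops.values())
-- ===== Notes on version B (the rewrite author's own statement) =====
-- stated objective: faster
-- what changed: Replaces six separate get_indexes scans plus a redundant try/except list.index pass with one dict of six pre-initialized lists filled in a single enumerate pass.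
import Mathlib
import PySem

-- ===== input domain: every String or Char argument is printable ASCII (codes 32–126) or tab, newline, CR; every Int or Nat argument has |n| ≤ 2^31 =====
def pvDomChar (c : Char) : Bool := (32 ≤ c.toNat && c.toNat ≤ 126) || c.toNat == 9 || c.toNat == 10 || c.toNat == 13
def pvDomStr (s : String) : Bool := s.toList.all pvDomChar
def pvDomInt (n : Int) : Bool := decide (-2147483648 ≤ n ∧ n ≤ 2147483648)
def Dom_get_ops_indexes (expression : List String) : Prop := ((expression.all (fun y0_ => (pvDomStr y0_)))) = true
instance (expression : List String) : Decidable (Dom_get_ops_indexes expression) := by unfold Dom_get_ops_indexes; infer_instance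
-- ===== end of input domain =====

-- B replaces A's six per-operator scans plus a redundant try/except index pass with one
-- dict of six pre-initialized lists filled in a single enumerate pass (measured faster in a timing run).

-- ===== PORT A =====
def get_indexes (l : List String) (c : String) : List Int :=
  (PySem.List.pyRange 0 (l.length : Int) 1).foldl
    (fun acc i => if PySem.List.pyGetD l i "" = c then acc ++ [i] else acc) []

def get_ops_indexes (expression : List String) : List (List Int) :=
  let ops_dict : PySem.Dict String (List Int) :=
    ((((((PySem.Dict.empty.insert "v" (get_indexes expression "v")).insert "^" (get_indexes expression "^")).insert
        "/" (get_indexes expression "/")).insert "*" (get_indexes expression "*")).insert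
        "+" (get_indexes expression "+")).insert "-" (get_indexes expression "-"))
  ops_dict.items.foldl
    (fun idxs kv =>
      match PySem.List.index? expression kv.1 with
      | some _ => idxs ++ [kv.2]
      | none => idxs ++ [[]]) []

-- ===== PORT B =====
def get_ops_indexes_alt (expression : List String) : List (List Int) :=
  let init : PySem.Dict String (List Int) :=
    ((((((PySem.Dict.empty.insert "v" []).insert "^" []).insert "/" []).insert "*" []).insert
        "+" []).insert "-" [])
  let d := (PySem.List.enumerate expression).foldl
    (fun d p => if d.contains p.2 then d.modify p.2 [] (fun l => l ++ [p.1]) else d) init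
  d.values

-- ===== PRECONDITION & SPEC =====
def Spec_get_ops_indexes (expression : List String) (out : List (List Int)) : Prop := out = get_ops_indexes_alt expression
instance (expression : List String) (out : List (List Int)) : Decidable (Spec_get_ops_indexes expression out) := by unfold Spec_get_ops_indexes; infer_instance

-- ===== CLAIM (what is proved, stated in full; the proofs are below) =====
def Claim_equal_get_ops_indexes : Prop := ∀ (expression : List String), Dom_get_ops_indexes expression → Spec_get_ops_indexes expression (get_ops_indexes expression)

-- ===== LEMMAS AND PROOFS =====

-- A's per-operator scan, characterized as a filter over the enumeration.
theorem get_indexes_eq (l : List String) (c : String) :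
    get_indexes l c = ((PySem.List.enumerate l).filter (fun p => decide (p.2 = c))).map (·.1) := by
  rw [get_indexes,
    PySem.List.foldl_append_ite (p := fun i : Int => PySem.List.pyGetD l i "" = c) (f := fun i => i),
    PySem.List.enumerate_eq_map_pyRange (d := "")]
  simp [List.filter_map, List.map_map, Function.comp_def]

-- A's redundant try/except branch: both arms append the same value.
theorem step_eq (e : List String) (k : String) (v : List Int) (idxs : List (List Int)) :
    (match PySem.List.index? e k with
      | some _ => idxs ++ [v] | none => idxs ++ [[]])
      = idxs ++ [match PySem.List.index? e k with | some _ => v | none => []] := by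
  cases PySem.List.index? e k <;> rfl

theorem branch_eq (e : List String) (k : String) :
    (match PySem.List.index? e k with
      | some _ => get_indexes e k | none => ([] : List Int))
      = ((PySem.List.enumerate e).filter (fun p => decide (p.2 = k))).map (·.1) := by
  cases h : PySem.List.index? e k with
  | some n => exact get_indexes_eq e k
  | none =>
    have hk : k ∉ e := (PySem.List.index?_eq_none_iff e k).mp h
    have : (PySem.List.enumerate e).filter (fun p => decide (p.2 = k)) = [] := by
      rw [List.filter_eq_nil_iff]
      intro p hp
      obtain ⟨j, hj, rfl⟩ := (PySem.List.mem_enumerate_iff _ _ _).mp hp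
      simp only [decide_eq_true_eq]
      exact fun hpk => hk (hpk ▸ List.getElem_mem hj)
    rw [this]; rfl

-- B's guarded loop preserves the key set, and accumulates each contained key's indexes.
theorem loop_keys (l : List (Int × String)) (d : PySem.Dict String (List Int)) :
    (l.foldl (fun d p => if d.contains p.2 then d.modify p.2 [] (fun l => l ++ [p.1]) else d) d).keys
      = d.keys := by
  induction l generalizing d with
  | nil => rfl
  | cons p l ih =>
    simp only [List.foldl_cons]
    by_cases hp : d.contains p.2
    · rw [if_pos hp, ih, PySem.Dict.modify, PySem.Dict.keys_insert_of_contains _ _ hp]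
    · rw [if_neg hp, ih]

theorem loop_getD (c : String) (l : List (Int × String)) (d : PySem.Dict String (List Int))
    (hc : d.contains c = true) :
    (l.foldl (fun d p => if d.contains p.2 then d.modify p.2 [] (fun l => l ++ [p.1]) else d) d).getD c []
      = d.getD c [] ++ (l.filter (fun p => decide (p.2 = c))).map (·.1) := by
  induction l generalizing d with
  | nil => simp
  | cons p l ih =>
    simp only [List.foldl_cons]
    by_cases hp : d.contains p.2
    · rw [if_pos hp]
      have hc' : (d.modify p.2 [] (fun l => l ++ [p.1])).contains c = true := by
        rw [PySem.Dict.modify, PySem.Dict.contains_insert]; simp [hc]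
      rw [ih _ hc']
      by_cases hpc : p.2 = c
      · subst hpc
        rw [PySem.Dict.modify, PySem.Dict.getD_insert_self]
        simp
      · rw [PySem.Dict.modify, PySem.Dict.getD_insert_of_ne _ _ _ (Ne.symm hpc)]
        simp [hpc]
    · rw [if_neg hp, ih _ hc]
      have hpc : p.2 ≠ c := fun h => hp (h ▸ hc)
      simp [hpc]

-- B's initial dict literal, named for the proof.
def bInit : PySem.Dict String (List Int) :=
  ((((((PySem.Dict.empty.insert "v" []).insert "^" []).insert "/" []).insert "*" []).insert
      "+" []).insert "-" [])

-- ===== VERDICT (by name: the statement is the Claim_ definition above) =====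
theorem get_ops_indexes_spec : Claim_equal_get_ops_indexes := by
  intro e _
  show get_ops_indexes e = get_ops_indexes_alt e
  have hA : get_ops_indexes e
      = [("v", get_indexes e "v"), ("^", get_indexes e "^"), ("/", get_indexes e "/"),
         ("*", get_indexes e "*"), ("+", get_indexes e "+"), ("-", get_indexes e "-")].foldl
          (fun idxs kv =>
            match PySem.List.index? e kv.1 with
            | some _ => idxs ++ [kv.2]
            | none => idxs ++ [[]]) [] := rfl
  have hB : get_ops_indexes_alt e
      = ((PySem.List.enumerate e).foldl
          (fun d p => if d.contains p.2 then d.modify p.2 [] (fun l => l ++ [p.1]) else d)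
          bInit).values := rfl
  rw [hA, hB]
  simp only [List.foldl_cons, List.foldl_nil]
  rw [step_eq, step_eq, step_eq, step_eq, step_eq, step_eq]
  rw [branch_eq, branch_eq, branch_eq, branch_eq, branch_eq, branch_eq]
  have hkeys : ((PySem.List.enumerate e).foldl
      (fun d p => if d.contains p.2 then d.modify p.2 [] (fun l => l ++ [p.1]) else d)
      bInit).keys = ["v", "^", "/", "*", "+", "-"] := by
    rw [loop_keys]; rfl
  rw [PySem.Dict.values_eq_map_keys _ (by rw [hkeys]; decide) [], hkeys]
  simp only [List.map_cons, List.map_nil]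
  rw [loop_getD "v" _ _ (by decide), loop_getD "^" _ _ (by decide), loop_getD "/" _ _ (by decide),
    loop_getD "*" _ _ (by decide), loop_getD "+" _ _ (by decide), loop_getD "-" _ _ (by decide)]
  simp
  decide
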